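-- pv_equiv track=rewrite | github.com/wrightflyer/XFM | xfm.py | convert78_chunk
-- ===== SOURCE A (Python) =====
-- def convert78_chunk(shifts, data):
--     if shifts == 0:
--         return data
--     result = []
--     for n in range(0, len(data)):
--         if (shifts << (n + 1)) & 0x80:
--             result.append(0x80 | data[n])
--         else:
--             result.append(data[n])
--     return result
-- ===== SOURCE B (Python) =====
-- def convert78_chunk(shifts, data):
--     if shifts == 0:
--         return data
--     # Stage 1: extract the 7 flag bits of `shifts` LSB-first by halving, then
--     # reverse so flags[k] is the flag for byte k.
--     flags = []
--     s = shifts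
--     for _ in range(7):
--         flags.append(s % 2)
--         s >>= 1
--     flags.reverse()
--     # Stage 2: mark the flagged bytes (zip truncates), bytes past the 7th pass through.
--     return [d | 0x80 if f else d for f, d in zip(flags, data)] + data[7:]
-- ===== Notes on version B (the rewrite author's own statement) =====
-- stated objective: faster
-- what changed: B is staged: it first extracts the 7 flag bits of shifts once by a halving loop plus reverse, then marks bytes by zipping the flag list with the data (zip truncates) and appends data[7:] untouched, instead of A's single per-byte loop that recomputes (shifts << (n+1)) & 0x80 and appends for every byte; bytes past the 7th are bulk-copied by a slice rather than tested one by one.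
import Mathlib
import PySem

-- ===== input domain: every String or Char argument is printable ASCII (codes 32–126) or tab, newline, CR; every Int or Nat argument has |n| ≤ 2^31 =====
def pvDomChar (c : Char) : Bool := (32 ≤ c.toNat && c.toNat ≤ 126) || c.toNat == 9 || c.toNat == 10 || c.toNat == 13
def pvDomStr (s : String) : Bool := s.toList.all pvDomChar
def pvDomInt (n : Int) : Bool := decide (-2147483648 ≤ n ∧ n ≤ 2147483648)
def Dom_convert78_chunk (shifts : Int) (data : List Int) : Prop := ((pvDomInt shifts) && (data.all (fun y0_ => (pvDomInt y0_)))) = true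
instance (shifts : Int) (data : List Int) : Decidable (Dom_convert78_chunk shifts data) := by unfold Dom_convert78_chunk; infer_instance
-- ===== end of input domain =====

-- B extracts the 7 flag bits of `shifts` once (halving loop + reverse), then marks the flagged
-- bytes by zipping flags with the data and passes bytes past the 7th through via data[7:],
-- instead of A's per-byte loop testing `(shifts << (n+1)) & 0x80`; return values agree everywhere
-- (when shifts == 0, B returns a copy of `data` where A returns `data` itself — same value).

-- ===== PORT A =====
-- for n in range(0, len(data)): n is always in range, so (data[n]?).getD 0 is the exact data[n].
def convert78_chunk (shifts : Int) (data : List Int) : List Int :=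
  if shifts = 0 then data
  else
    (List.range data.length).foldl
      (fun (result : List Int) (n : Nat) =>
        if PySem.Int.band (shifts <<< (n + 1)) 128 ≠ 0 then
          result ++ [PySem.Int.bor 128 ((data[n]?).getD 0)]
        else
          result ++ [(data[n]?).getD 0])
      []

-- ===== PORT B =====
-- flags loop: state (flags, s); `flags.append(s % 2)` then `s >>= 1`, 7 times; then reverse.
-- zip truncates like Python's zip; data[7:] is PySem.List.slice data (some 7) none.
def convert78_chunk_alt (shifts : Int) (data : List Int) : List Int :=
  if shifts = 0 then data
  else
    (((((List.range 7).foldl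
          (fun (st : List Int × Int) _ => (st.1 ++ [PySem.Int.mod st.2 2], st.2 >>> (1 : Nat)))
          ([], shifts)).1.reverse).zip data).map
        (fun fd => if fd.1 ≠ 0 then PySem.Int.bor fd.2 128 else fd.2))
      ++ PySem.List.slice data (some 7) none

-- ===== PRECONDITION & SPEC =====
def Spec_convert78_chunk (shifts : Int) (data : List Int) (out : List Int) : Prop := out = convert78_chunk_alt shifts data
instance (shifts : Int) (data : List Int) (out : List Int) : Decidable (Spec_convert78_chunk shifts data out) := by unfold Spec_convert78_chunk; infer_instance

-- ===== CLAIM (what is proved, stated in full; the proofs are below) =====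
def Claim_equal_convert78_chunk : Prop := ∀ (shifts : Int) (data : List Int), Dom_convert78_chunk shifts data → Spec_convert78_chunk shifts data (convert78_chunk shifts data)

-- ===== LEMMAS AND PROOFS =====

-- Nat bit extraction: and-with-2^7 is the 7th binary digit.
theorem pv_nat_and_128 (m : Nat) : m &&& 128 = (m / 128 % 2) * 128 := by
  have h1 := Nat.and_two_pow m 7
  norm_num at h1
  have h2 : m.testBit 7 = ((m / 128 % 2) != 0) := by
    show (1 &&& m >>> 7 != 0) = _
    rw [Nat.and_comm, Nat.and_one_is_mod, Nat.shiftRight_eq_div_pow]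
  rw [h1, h2]
  rcases Nat.mod_two_eq_zero_or_one (m / 128) with h | h <;> simp [h]

-- Python's  y & 0x80  extracts bit 7 of y, also for negative y (two's complement).
theorem pv_band_128 (y : Int) : PySem.Int.band y 128 = (y / 128 % 2) * 128 := by
  unfold PySem.Int.band
  split_ifs with hy hb hb
  · have h := pv_nat_and_128 y.toNat
    have h128 : ((128 : Int)).toNat = 128 := rfl
    rw [h128, h]
    omega
  · norm_num at hb
  · have h := pv_nat_and_128 (-y - 1).toNat
    have h128 : ((128 : Int)).toNat = 128 := rfl
    rw [h128, Nat.and_comm, h]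
    omega
  · norm_num at hb

-- Python's  y & 1  is nonzero iff y is odd (y % 2 = 1 with Python's %).
theorem pv_band_1 (y : Int) : (PySem.Int.band y 1 ≠ 0) ↔ y % 2 = 1 := by
  rw [PySem.Int.band_one]
  unfold PySem.Int.mod
  rw [Int.fmod_eq_emod]
  have := Int.emod_two_eq_zero_or_one y
  split_ifs with h
  · omega
  · simp at h

theorem pv_shl (x : Int) (k : Nat) : x <<< k = x * 2 ^ k := by
  rw [← Int.shiftLeft_natCast_right, Int.shiftLeft_eq_mul_pow]; push_cast; ring

theorem pv_shr (x : Int) (k : Nat) : x >>> k = x / 2 ^ k := by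
  rw [Int.shiftRight_eq_div_pow]; push_cast; ring_nf

-- THE BRIDGE: A's test on byte n reads flag bit 6 - n of shifts (and fails for n ≥ 7).
theorem pv_bridge (x : Int) (i : Nat) :
    (PySem.Int.band (x <<< (i + 1)) 128 ≠ 0) ↔
      (i ≤ 6 ∧ PySem.Int.band (x >>> (6 - i)) 1 ≠ 0) := by
  rw [pv_shl, pv_band_128]
  rw [pv_band_1, pv_shr]
  by_cases hi : i ≤ 6
  · have hdiv : x * 2 ^ (i + 1) / 128 = x / 2 ^ (6 - i) := by
      rw [show (128 : Int) = 2 ^ (i + 1) * 2 ^ (6 - i) by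
            rw [← pow_add, show i + 1 + (6 - i) = 7 by omega]; norm_num,
          mul_comm x (2 ^ (i + 1)), Int.mul_ediv_mul_of_pos _ _ (by positivity)]
    rw [hdiv]
    have hq := Int.emod_two_eq_zero_or_one (x / 2 ^ (6 - i))
    constructor
    · intro h; exact ⟨hi, by omega⟩
    · intro h; omega
  · have h2 : (2 : Int) ^ (i - 6) * 128 = 2 ^ (i + 1) := by
      rw [show (128 : Int) = 2 ^ 7 by norm_num, ← pow_add]
      congr 1
      omega
    have hsplit : x * 2 ^ (i + 1) = x * 2 ^ (i - 6) * 128 := by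
      rw [mul_assoc, h2]
    have heven : x * 2 ^ (i - 6) % 2 = 0 := by
      obtain ⟨n, hn⟩ : ∃ n, i - 6 = n + 1 := ⟨i - 7, by omega⟩
      rw [show x * 2 ^ (i - 6) = x * 2 ^ n * 2 by rw [hn, pow_succ]; ring]
      exact Int.mul_emod_left _ _
    rw [hsplit, Int.mul_ediv_cancel _ (by norm_num : (128 : Int) ≠ 0), heven]
    simp [hi]

-- A's loop appends one byte per index: it is the map of its branch over the index range.
theorem pv_A_fold (shifts : Int) (data : List Int) (l : List Nat) (init : List Int) :
    l.foldl
      (fun (result : List Int) (n : Nat) =>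
        if PySem.Int.band (shifts <<< (n + 1)) 128 ≠ 0 then
          result ++ [PySem.Int.bor 128 ((data[n]?).getD 0)]
        else
          result ++ [(data[n]?).getD 0]) init
      = init ++ l.map
          (fun (n : Nat) =>
            if PySem.Int.band (shifts <<< (n + 1)) 128 ≠ 0 then
              PySem.Int.bor 128 ((data[n]?).getD 0)
            else (data[n]?).getD 0) := by
  induction l generalizing init with
  | nil => simp
  | cons a t ih =>
    rw [List.foldl_cons, List.map_cons, ih]
    by_cases hc : PySem.Int.band (shifts <<< (a + 1)) 128 ≠ 0 <;>
      simp [hc]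

-- B's marking stage, observed at index i: mark xs[i] iff flag i exists and is nonzero;
-- past fs.length the drop-tail passes xs[i] through unchanged.
theorem pv_zipmark (fs xs : List Int) (i : Nat) :
    ((fs.zip xs).map (fun fd => if fd.1 ≠ 0 then PySem.Int.bor fd.2 128 else fd.2)
        ++ xs.drop fs.length)[i]?
      = (xs[i]?).map
          (fun d => if (fs[i]?).getD 0 ≠ 0 then PySem.Int.bor d 128 else d) := by
  induction fs generalizing xs i with
  | nil =>
    cases h : xs[i]? <;> simp [h]
  | cons f ft ih =>
    cases xs with
    | nil => simp
    | cons x xt =>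
      cases i with
      | zero => simp
      | succ j =>
        simp only [List.zip_cons_cons, List.map_cons, List.length_cons, List.drop_succ_cons,
          List.cons_append, List.getElem?_cons_succ]
        exact ih xt j

-- The flags loop fully computed: 7 iterations of (append s % 2, halve s), then reversed.
theorem pv_flags (shifts : Int) :
    (((List.range 7).foldl
        (fun (st : List Int × Int) _ => (st.1 ++ [PySem.Int.mod st.2 2], st.2 >>> (1 : Nat)))
        ([], shifts)).1.reverse)
    = [PySem.Int.mod (shifts >>> (1:Nat) >>> (1:Nat) >>> (1:Nat) >>> (1:Nat) >>> (1:Nat) >>> (1:Nat)) 2,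
       PySem.Int.mod (shifts >>> (1:Nat) >>> (1:Nat) >>> (1:Nat) >>> (1:Nat) >>> (1:Nat)) 2,
       PySem.Int.mod (shifts >>> (1:Nat) >>> (1:Nat) >>> (1:Nat) >>> (1:Nat)) 2,
       PySem.Int.mod (shifts >>> (1:Nat) >>> (1:Nat) >>> (1:Nat)) 2,
       PySem.Int.mod (shifts >>> (1:Nat) >>> (1:Nat)) 2,
       PySem.Int.mod (shifts >>> (1:Nat)) 2,
       PySem.Int.mod shifts 2] := rfl

-- ===== VERDICT (by name: the statement is the Claim_ definition above) =====
theorem convert78_chunk_spec : Claim_equal_convert78_chunk := by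
  intro shifts data _
  unfold Spec_convert78_chunk convert78_chunk convert78_chunk_alt
  by_cases h0 : shifts = 0
  · simp [h0]
  · rw [if_neg h0, if_neg h0, pv_A_fold, List.nil_append, pv_flags]
    rw [PySem.List.slice_from data (by norm_num : (0:Int) ≤ 7)]
    apply List.ext_getElem?
    intro i
    rw [show ((7:Int).toNat) = ([PySem.Int.mod (shifts >>> (1:Nat) >>> (1:Nat) >>> (1:Nat) >>> (1:Nat) >>> (1:Nat) >>> (1:Nat)) 2,
       PySem.Int.mod (shifts >>> (1:Nat) >>> (1:Nat) >>> (1:Nat) >>> (1:Nat) >>> (1:Nat)) 2,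
       PySem.Int.mod (shifts >>> (1:Nat) >>> (1:Nat) >>> (1:Nat) >>> (1:Nat)) 2,
       PySem.Int.mod (shifts >>> (1:Nat) >>> (1:Nat) >>> (1:Nat)) 2,
       PySem.Int.mod (shifts >>> (1:Nat) >>> (1:Nat)) 2,
       PySem.Int.mod (shifts >>> (1:Nat)) 2,
       PySem.Int.mod shifts 2] : List Int).length from rfl, pv_zipmark]
    by_cases hil : i < data.length
    · rw [List.getElem?_map, List.getElem?_range hil, List.getElem?_eq_getElem hil]
      simp only [Option.map_some, List.getElem?_eq_getElem hil, Option.getD_some]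
      congr 1
      have hcond : (PySem.Int.band (shifts <<< (i + 1)) 128 ≠ 0) ↔
          (([PySem.Int.mod (shifts >>> (1:Nat) >>> (1:Nat) >>> (1:Nat) >>> (1:Nat) >>> (1:Nat) >>> (1:Nat)) 2,
             PySem.Int.mod (shifts >>> (1:Nat) >>> (1:Nat) >>> (1:Nat) >>> (1:Nat) >>> (1:Nat)) 2,
             PySem.Int.mod (shifts >>> (1:Nat) >>> (1:Nat) >>> (1:Nat) >>> (1:Nat)) 2,
             PySem.Int.mod (shifts >>> (1:Nat) >>> (1:Nat) >>> (1:Nat)) 2,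
             PySem.Int.mod (shifts >>> (1:Nat) >>> (1:Nat)) 2,
             PySem.Int.mod (shifts >>> (1:Nat)) 2,
             PySem.Int.mod shifts 2] : List Int)[i]?.getD 0 ≠ 0) := by
        rw [pv_bridge]
        by_cases hi6 : i ≤ 6
        · interval_cases i <;> simp [pv_band_1, pv_shr] <;> omega
        · rw [List.getElem?_eq_none (by simp; omega)]
          simp [hi6]
      by_cases hA : PySem.Int.band (shifts <<< (i + 1)) 128 ≠ 0
      · rw [if_pos hA, if_pos (hcond.mp hA), PySem.Int.bor_comm]
      · rw [if_neg hA, if_neg (fun h => hA (hcond.mpr h))]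
    · rw [List.getElem?_eq_none (by simp; omega),
        List.getElem?_eq_none (by omega : data.length ≤ i)]
      rfl
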